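-- pv_equiv track=rewrite | github.com/zoLovro/Castlevania-or-something | levelmechanics.py | generate_reverse_stair_pattern
-- ===== SOURCE A (Python) =====
-- def generate_reverse_stair_pattern(start_x, start_y, hx, hy, count):
--     coordinates = []
--     coordinates.append((start_x, start_y))
--     count += (count // 3) + 1
--     deljeno = 0
--
--     for x in range(1, count):
--         if x % 3 == 2:
--             # Move vertically downwards
--             coordinates.append((coordinates[x - 1][0], coordinates[x - 1][1] - hy))
--             deljeno += 2
--         else:
--             # Move horizontally to the left
--             xcord = start_x - hx * (x - deljeno)
--             coordinates.append((xcord, coordinates[x - 1][1]))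
--
--     return coordinates
-- ===== SOURCE B (Python) =====
-- def generate_reverse_stair_pattern(start_x, start_y, hx, hy, count):
--     # per-index closed form instead of a running-state loop
--     n = count + count // 3 + 1
--     out = [(start_x, start_y)]
--     for x in range(1, n):
--         h = x - 1 if x % 3 == 2 else x
--         out.append((start_x - hx * (h - 2 * (h // 3)),
--                     start_y - hy * ((x + 1) // 3)))
--     return out
-- ===== Notes on version B (the rewrite author's own statement) =====
-- stated objective: simpler
-- what changed: Replaced A's running-state loop (which rereads coordinates[x-1] and maintains the mutable deljeno counter) with a direct per-index closed form: each coordinate is computed independently from its index via integer arithmetic.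
import Mathlib
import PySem

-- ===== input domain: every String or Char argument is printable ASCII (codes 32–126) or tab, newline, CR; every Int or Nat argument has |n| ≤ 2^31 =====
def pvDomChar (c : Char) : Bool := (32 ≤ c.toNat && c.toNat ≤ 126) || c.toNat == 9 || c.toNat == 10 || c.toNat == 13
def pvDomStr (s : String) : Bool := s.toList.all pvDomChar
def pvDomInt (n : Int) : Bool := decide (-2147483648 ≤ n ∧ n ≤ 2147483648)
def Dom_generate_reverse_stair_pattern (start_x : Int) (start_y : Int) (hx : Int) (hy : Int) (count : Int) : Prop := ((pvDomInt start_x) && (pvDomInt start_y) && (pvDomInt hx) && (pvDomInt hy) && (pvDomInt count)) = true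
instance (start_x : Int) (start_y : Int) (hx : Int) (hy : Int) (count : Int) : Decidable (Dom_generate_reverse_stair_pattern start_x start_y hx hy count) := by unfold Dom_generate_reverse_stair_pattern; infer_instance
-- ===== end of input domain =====

-- B replaces A's running-state loop (which rereads coordinates[x-1] and maintains `deljeno`)
-- with a per-index closed form for each coordinate; objective: simpler (same O(n) cost).

-- ===== PORT A =====
-- one loop iteration of A: state is (coordinates, deljeno); coordinates[x-1] is always
-- in range in A (the list has exactly x elements when index x is processed), so the
-- getD default is never read.
def pvStepA (start_x : Int) (hx : Int) (hy : Int)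
    (st : List (Int × Int) × Int) (x : Int) : List (Int × Int) × Int :=
  if PySem.Int.mod x 3 = 2 then
    let prev := PySem.List.pyGetD st.1 (x - 1) (0, 0)
    (st.1 ++ [(prev.1, prev.2 - hy)], st.2 + 2)
  else
    let prev := PySem.List.pyGetD st.1 (x - 1) (0, 0)
    (st.1 ++ [(start_x - hx * (x - st.2), prev.2)], st.2)

def generate_reverse_stair_pattern (start_x : Int) (start_y : Int) (hx : Int) (hy : Int) (count : Int) : List (Int × Int) :=
  ((PySem.List.pyRange 1 (count + PySem.Int.floordiv count 3 + 1) 1).foldl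
      (pvStepA start_x hx hy) ([(start_x, start_y)], 0)).1

-- ===== PORT B =====
-- closed form for the element at index x (x ≥ 1)
def pvCoordB (start_x : Int) (start_y : Int) (hx : Int) (hy : Int) (x : Int) : Int × Int :=
  let h := if PySem.Int.mod x 3 = 2 then x - 1 else x
  (start_x - hx * (h - 2 * PySem.Int.floordiv h 3),
   start_y - hy * PySem.Int.floordiv (x + 1) 3)

def generate_reverse_stair_pattern_alt (start_x : Int) (start_y : Int) (hx : Int) (hy : Int) (count : Int) : List (Int × Int) :=
  (start_x, start_y) ::
    (PySem.List.pyRange 1 (count + PySem.Int.floordiv count 3 + 1) 1).map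
      (pvCoordB start_x start_y hx hy)

-- ===== PRECONDITION & SPEC =====
def Spec_generate_reverse_stair_pattern (start_x : Int) (start_y : Int) (hx : Int) (hy : Int) (count : Int) (out : List (Int × Int)) : Prop := out = generate_reverse_stair_pattern_alt start_x start_y hx hy count
instance (start_x : Int) (start_y : Int) (hx : Int) (hy : Int) (count : Int) (out : List (Int × Int)) : Decidable (Spec_generate_reverse_stair_pattern start_x start_y hx hy count out) := by unfold Spec_generate_reverse_stair_pattern; infer_instance

-- ===== CLAIM (what is proved, stated in full; the proofs are below) =====
def Claim_equal_generate_reverse_stair_pattern : Prop := ∀ (start_x : Int) (start_y : Int) (hx : Int) (hy : Int) (count : Int), Dom_generate_reverse_stair_pattern start_x start_y hx hy count → Spec_generate_reverse_stair_pattern start_x start_y hx hy count (generate_reverse_stair_pattern start_x start_y hx hy count)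

-- ===== LEMMAS AND PROOFS =====

theorem pvCoordB_zero (sx sy hx hy : Int) : pvCoordB sx sy hx hy 0 = (sx, sy) := by
  simp [pvCoordB, PySem.Int.mod, PySem.Int.floordiv]

theorem pv_step (sx sy hx hy : Int) (k : Nat) :
    pvStepA sx hx hy
      ((sx, sy) :: (PySem.List.pyRange 1 (1 + (k : Int)) 1).map (pvCoordB sx sy hx hy),
       2 * (((k : Int) + 1) / 3)) (1 + (k : Int))
    = ((sx, sy) :: ((PySem.List.pyRange 1 (1 + (k : Int)) 1).map (pvCoordB sx sy hx hy)
         ++ [pvCoordB sx sy hx hy (1 + (k : Int))]),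
       2 * (((k : Int) + 2) / 3)) := by
  have hlist : (sx, sy) :: (PySem.List.pyRange 1 (1 + (k : Int)) 1).map (pvCoordB sx sy hx hy)
      = (PySem.List.pyRange 0 (((k + 1 : Nat) : Int)) 1).map (pvCoordB sx sy hx hy) := by
    rw [show ((k + 1 : Nat) : Int) = 1 + (k : Int) by push_cast; ring,
        PySem.List.pyRange_one_cons (a := 0) (b := 1 + (k : Int)) (by omega)]
    norm_num [pvCoordB_zero]
  have hprev : PySem.List.pyGetD
      ((sx, sy) :: (PySem.List.pyRange 1 (1 + (k : Int)) 1).map (pvCoordB sx sy hx hy))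
      ((1 + (k : Int)) - 1) (0, 0) = pvCoordB sx sy hx hy (k : Int) := by
    rw [hlist, show (1 + (k : Int)) - 1 = (k : Int) by ring,
        PySem.List.pyGetD_map_pyRange _ (k + 1) k _ (by omega)]
  by_cases hc : (1 + (k : Int)) % 3 = 2
  · have h2 : PySem.Int.mod (1 + (k : Int)) 3 = 2 := by
      rw [PySem.Int.mod_eq_emod_of_pos (by norm_num)]; exact hc
    have h1 : PySem.Int.mod ((k : Int)) 3 ≠ 2 := by
      rw [PySem.Int.mod_eq_emod_of_pos (by norm_num)]; omega
    simp only [pvStepA, h2, if_pos, hprev, Prod.mk.injEq]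
    refine ⟨?_, by omega⟩
    simp only [List.cons_append, List.cons.injEq, List.append_cancel_left_eq, List.cons.injEq,
      and_true, true_and]
    simp only [pvCoordB, h2, h1,
      PySem.Int.floordiv_eq_ediv_of_pos (by norm_num : (0:Int) < 3), Prod.mk.injEq]
    rw [show (1 : Int) + (k : Int) - 1 = (k : Int) by ring,
        show ((1 : Int) + (k : Int) + 1) / 3 = ((k : Int) + 1) / 3 + 1 by omega]
    exact ⟨rfl, by ring⟩
  · have h2 : PySem.Int.mod (1 + (k : Int)) 3 ≠ 2 := by
      rw [PySem.Int.mod_eq_emod_of_pos (by norm_num)]; exact hc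
    have hk0 : (0 : Int) ≤ (k : Int) := by omega
    simp only [pvStepA, h2, if_false, hprev, Prod.mk.injEq]
    refine ⟨?_, by omega⟩
    simp only [List.cons_append, List.cons.injEq, List.append_cancel_left_eq,
      and_true, true_and]
    simp only [pvCoordB, h2, if_false,
      PySem.Int.floordiv_eq_ediv_of_pos (by norm_num : (0:Int) < 3), Prod.mk.injEq]
    rw [show (1 : Int) + (k : Int) = (k : Int) + 1 by ring]
    exact ⟨rfl, by rw [show ((k : Int) + 1 + 1) / 3 = ((k : Int) + 1) / 3 by omega]⟩


-- loop invariant: after processing x = 1..m, A's state is B's prefix together with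
-- deljeno = 2 * ((m+1)//3) (twice the number of vertical steps among 1..m)
theorem pv_loop_inv (start_x start_y hx hy : Int) (m : Nat) :
    (PySem.List.pyRange 1 (1 + (m : Int)) 1).foldl (pvStepA start_x hx hy) ([(start_x, start_y)], 0)
      = ((start_x, start_y) :: (PySem.List.pyRange 1 (1 + (m : Int)) 1).map (pvCoordB start_x start_y hx hy),
         2 * (((m : Int) + 1) / 3)) := by
  induction m with
  | zero =>
    rw [show (1 : Int) + ((0 : Nat) : Int) = 1 by norm_num,
        PySem.List.pyRange_one_eq_nil (by omega)]
    simp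
  | succ k ih =>
    have hsplit : PySem.List.pyRange 1 (1 + ((k + 1 : Nat) : Int)) 1
        = PySem.List.pyRange 1 (1 + (k : Int)) 1 ++ [1 + (k : Int)] := by
      have := PySem.List.pyRange_one_succ_right (a := 1) (b := 1 + (k : Int)) (by omega)
      push_cast
      rw [show (1 : Int) + ((k : Int) + 1) = (1 + (k : Int)) + 1 by ring, this]
    rw [hsplit, List.foldl_append, ih, List.map_append]
    simp only [List.foldl_cons, List.foldl_nil, List.map_cons, List.map_nil]
    rw [show (((k + 1 : Nat) : Int) + 1) / 3 = ((k : Int) + 2) / 3 by push_cast; ring_nf]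
    exact pv_step start_x start_y hx hy k

theorem generate_reverse_stair_pattern_spec : Claim_equal_generate_reverse_stair_pattern := by
  intro sx sy hx hy count _
  unfold Spec_generate_reverse_stair_pattern generate_reverse_stair_pattern generate_reverse_stair_pattern_alt
  set n := count + PySem.Int.floordiv count 3 + 1 with hn
  by_cases h : n ≤ 1
  · rw [PySem.List.pyRange_one_eq_nil h]; simp
  · have hm : n = 1 + ((n - 1).toNat : Int) := by omega
    rw [hm, pv_loop_inv sx sy hx hy (n - 1).toNat]
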